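-- pv_equiv track=rewrite | github.com/posl/comment_recommendation | script/mod_gen/1_time/en/227_C/8.py | solve
-- ===== SOURCE A (Python) =====
-- def solve(N):
--     count = 0
--     for a in range(1,N+1):
--         if a**2 > N:
--             break
--         for b in range(a,N+1):
--             if a*b > N:
--                 break
--             count += (N//(a*b))
--     return count
-- ===== SOURCE B (Python) =====
-- def solve(N):
--     # Hyperbola-method rewrite: the inner sum over b is sum_{b=a..M} M//b with
--     # M = N//a, computed in O(sqrt(M)) by grouping b into blocks of equal M//b.
--     def dsum(M, lo):
--         total = 0
--         i = lo
--         while i <= M: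
--             q = M // i
--             j = M // q
--             total += q * (j - i + 1)
--             i = j + 1
--         return total
--     count = 0
--     a = 1
--     while a * a <= N:
--         count += dsum(N // a, a)
--         a += 1
--     return count
-- ===== Notes on version B (the rewrite author's own statement) =====
-- stated objective: faster
-- what changed: A's inner loop adding N//(a*b) term by term is replaced by floor-division block grouping (hyperbola method): for each a the inner sum equals sum of M//b for b=a..M with M=N//a, computed in O(sqrt(M)) blocks of constant quotient.
import Mathlib
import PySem

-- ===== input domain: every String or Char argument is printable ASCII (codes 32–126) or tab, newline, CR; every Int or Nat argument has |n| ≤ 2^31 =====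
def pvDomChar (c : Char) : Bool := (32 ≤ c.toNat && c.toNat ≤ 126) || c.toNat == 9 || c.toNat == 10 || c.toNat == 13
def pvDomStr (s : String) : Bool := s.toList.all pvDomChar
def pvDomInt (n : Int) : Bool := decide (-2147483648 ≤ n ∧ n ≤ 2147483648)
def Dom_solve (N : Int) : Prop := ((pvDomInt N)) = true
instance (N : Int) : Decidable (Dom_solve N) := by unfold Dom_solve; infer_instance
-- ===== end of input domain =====

-- B replaces A's inner b-loop by floor-division block grouping (hyperbola method), a different algorithm.

-- ===== PORT A =====
-- inner 'for b in range(a, N+1): if a*b > N: break; count += N//(a*b)'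
def solveInnerA (N a : Int) (count : Int) : List Int → Int
  | [] => count
  | b :: rest =>
      if a * b > N then count
      else solveInnerA N a (count + PySem.Int.floordiv N (a * b)) rest

-- outer 'for a in range(1, N+1): if a**2 > N: break; <inner loop>'
def solveOuterA (N : Int) (count : Int) : List Int → Int
  | [] => count
  | a :: rest =>
      if a ^ 2 > N then count
      else solveOuterA N (solveInnerA N a count (PySem.List.pyRange a (N + 1) 1)) rest

def solve (N : Int) : Int := solveOuterA N 0 (PySem.List.pyRange 1 (N + 1) 1)

-- ===== PORT B =====
-- 'while i <= M: q = M//i; j = M//q; total += q*(j-i+1); i = j+1'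
-- (fuel is a totality guard only: on every call made by dsumB/solveAltOuter, i advances
--  by at least 1 per step, so the initial fuel (M+1-lo).toNat is never exhausted)
def dsumGo (M : Int) : Nat → Int → Int → Int
  | 0, _, total => total
  | fuel + 1, i, total =>
      if i ≤ M then
        let q := PySem.Int.floordiv M i
        let j := PySem.Int.floordiv M q
        dsumGo M fuel (j + 1) (total + q * (j - i + 1))
      else total

def dsumB (M lo : Int) : Int := dsumGo M (M + 1 - lo).toNat lo 0

-- 'a = 1; while a*a <= N: count += dsum(N//a, a); a += 1'
def solveAltOuter (N a count : Int) : Int :=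
  if h : a * a ≤ N then
    solveAltOuter N (a + 1) (count + dsumB (PySem.Int.floordiv N a) a)
  else count
termination_by (N + 1 - a).toNat
decreasing_by
  have : a ≤ N := by nlinarith [mul_self_nonneg a, mul_self_nonneg (a - 1)]
  omega

def solve_alt (N : Int) : Int := solveAltOuter N 1 0

-- ===== PRECONDITION & SPEC =====
def Spec_solve (N : Int) (out : Int) : Prop := out = solve_alt N
instance (N : Int) (out : Int) : Decidable (Spec_solve N out) := by unfold Spec_solve; infer_instance

-- ===== CLAIM (what is proved, stated in full; the proofs are below) =====
def Claim_equal_solve : Prop := ∀ (N : Int), Dom_solve N → Spec_solve N (solve N)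

-- ===== LEMMAS AND PROOFS =====

lemma le_of_sq_le {a N : Int} (h : a * a ≤ N) : a ≤ N := by
  nlinarith [mul_self_nonneg a, mul_self_nonneg (a - 1)]

-- spec-side sum: g M lo = Σ_{b=lo..M} M//b
def g (M lo : Int) : Int :=
  if _ : lo ≤ M then PySem.Int.floordiv M lo + g M (lo + 1) else 0
termination_by (M + 1 - lo).toNat
decreasing_by omega

-- spec-side outer sum: G N a = Σ_{a'≥a, a'*a'≤N} g (N//a') a'
def G (N a : Int) : Int :=
  if h : a * a ≤ N then g (PySem.Int.floordiv N a) a + G N (a + 1) else 0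
termination_by (N + 1 - a).toNat
decreasing_by
  have := le_of_sq_le h
  omega

lemma le_floordiv_iff {N a b : Int} (ha : 0 < a) :
    b ≤ PySem.Int.floordiv N a ↔ a * b ≤ N := by
  rw [PySem.Int.le_floordiv_iff_mul_le ha, mul_comm]

lemma floordiv_floordiv {N a b : Int} (ha : 0 < a) (hb : 0 < b) :
    PySem.Int.floordiv (PySem.Int.floordiv N a) b = PySem.Int.floordiv N (a * b) := by
  rw [PySem.Int.floordiv_eq_ediv_of_pos ha, PySem.Int.floordiv_eq_ediv_of_pos hb,
    PySem.Int.floordiv_eq_ediv_of_pos (mul_pos ha hb)]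
  exact Int.ediv_ediv_of_nonneg ha.le

lemma g_pos {M lo : Int} (h : lo ≤ M) :
    g M lo = PySem.Int.floordiv M lo + g M (lo + 1) := by
  rw [g, dif_pos h]

lemma g_neg {M lo : Int} (h : M < lo) : g M lo = 0 := by
  rw [g, dif_neg (by omega)]

lemma G_pos {N a : Int} (h : a * a ≤ N) :
    G N a = g (PySem.Int.floordiv N a) a + G N (a + 1) := by
  rw [G, dif_pos h]

lemma G_neg {N a : Int} (h : N < a * a) : G N a = 0 := by
  rw [G, dif_neg (by omega)]

-- A's inner loop computes count + g (N//a) lo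
lemma innerA_eq_g (N a : Int) (ha : 1 ≤ a) (lo count : Int) (hlo : 1 ≤ lo) :
    solveInnerA N a count (PySem.List.pyRange lo (N + 1) 1) =
      count + g (PySem.Int.floordiv N a) lo := by
  by_cases h : lo ≤ N
  · rw [PySem.List.pyRange_one_cons (by omega), solveInnerA]
    by_cases hab : a * lo > N
    · rw [if_pos hab, g_neg, add_zero]
      have : ¬ (lo ≤ PySem.Int.floordiv N a) := by
        rw [le_floordiv_iff (by omega)]; omega
      omega
    · rw [if_neg hab, g_pos ((le_floordiv_iff (by omega)).mpr (by omega)),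
        floordiv_floordiv (by omega) (by omega),
        innerA_eq_g N a ha (lo + 1) _ (by omega)]
      ring
  · rw [PySem.List.pyRange_one_eq_nil (by omega), solveInnerA, g_neg, add_zero]
    have : ¬ (lo ≤ PySem.Int.floordiv N a) := by
      rw [le_floordiv_iff (by omega)]; nlinarith
    omega
termination_by (N + 1 - lo).toNat
decreasing_by omega

-- the block [i, M//(M//i)] has constant quotient
lemma block_const {M i : Int} (hi : 1 ≤ i) (hiM : i ≤ M) :
    ∀ k, i ≤ k → k ≤ PySem.Int.floordiv M (PySem.Int.floordiv M i) →
      PySem.Int.floordiv M k = PySem.Int.floordiv M i := by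
  intro k hik hkj
  set q := PySem.Int.floordiv M i with hq
  have hq1 : 1 ≤ q := by rw [hq, le_floordiv_iff (by omega)]; omega
  have hbr := (PySem.Int.floordiv_eq_iff_of_pos (a := M) (b := i) (by omega)).mp hq.symm
  rw [PySem.Int.floordiv_eq_iff_of_pos (by omega)]
  constructor
  · have := (le_floordiv_iff (N := M) (a := q) (by omega)).mp hkj
    linarith
  · calc M < (q + 1) * i := hbr.2
      _ ≤ (q + 1) * k := by nlinarith
lemma g_const_block (M q : Int) (i j : Int) (hi : 1 ≤ i) (hij : i ≤ j + 1) (hjM : j ≤ M)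
    (hconst : ∀ k, i ≤ k → k ≤ j → PySem.Int.floordiv M k = q) :
    g M i = q * (j + 1 - i) + g M (j + 1) := by
  by_cases h : i ≤ j
  · rw [g_pos (by omega), hconst i le_rfl h,
      g_const_block M q (i + 1) j (by omega) (by omega) hjM
        (fun k hk1 hk2 => hconst k (by omega) hk2)]
    ring
  · have : i = j + 1 := by omega
    subst this
    ring
termination_by (j + 1 - i).toNat
decreasing_by omega

lemma dsumGo_eq_g (M : Int) (fuel : Nat) (i total : Int) (hi : 1 ≤ i)
    (hfuel : (M + 1 - i).toNat ≤ fuel) :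
    dsumGo M fuel i total = total + g M i := by
  induction fuel generalizing i total with
  | zero =>
      rw [dsumGo, g_neg (by omega), add_zero]
  | succ fuel ih =>
      rw [dsumGo]
      by_cases h : i ≤ M
      · rw [if_pos h]
        set q := PySem.Int.floordiv M i with hq
        set j := PySem.Int.floordiv M q with hj
        have hq1 : 1 ≤ q := by rw [hq, le_floordiv_iff (by omega)]; omega
        have hbr := (PySem.Int.floordiv_eq_iff_of_pos (a := M) (b := i) (by omega)).mp hq.symm
        have hij : i ≤ j := by
          rw [hj, le_floordiv_iff (by omega)]
          nlinarith [hbr.1]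
        have hjq : j * q ≤ M :=
          ((PySem.Int.floordiv_eq_iff_of_pos (a := M) (b := q) (by omega)).mp hj.symm).1
        have hjM : j ≤ M := by nlinarith
        rw [ih (j + 1) _ (by omega) (by omega),
          g_const_block M q i j hi (by omega) hjM
            (fun k hk1 hk2 => (block_const hi h k hk1 (hj ▸ hk2)).trans hq.symm)]
        ring
      · rw [if_neg h, g_neg (by omega), add_zero]

-- A's outer loop computes count + G N a0
lemma outerA_eq_G (N : Int) (a0 count : Int) (ha : 1 ≤ a0) :
    solveOuterA N count (PySem.List.pyRange a0 (N + 1) 1) = count + G N a0 := by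
  by_cases h : a0 ≤ N
  · rw [PySem.List.pyRange_one_cons (by omega), solveOuterA]
    rw [pow_two] at *
    by_cases hsq : a0 * a0 > N
    · rw [if_pos hsq, G_neg hsq, add_zero]
    · rw [if_neg hsq, innerA_eq_g N a0 ha a0 count ha,
        G_pos (by omega), outerA_eq_G N (a0 + 1) _ (by omega)]
      ring
  · rw [PySem.List.pyRange_one_eq_nil (by omega), solveOuterA, G_neg, add_zero]
    by_contra hsq
    have := le_of_sq_le (show a0 * a0 ≤ N by omega)
    omega
termination_by (N + 1 - a0).toNat
decreasing_by omega

lemma altOuter_eq_G (N : Int) (a count : Int) (ha : 1 ≤ a) :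
    solveAltOuter N a count = count + G N a := by
  rw [solveAltOuter]
  by_cases h : a * a ≤ N
  · rw [dif_pos h, G_pos h, dsumB,
      dsumGo_eq_g _ _ _ _ ha le_rfl,
      altOuter_eq_G N (a + 1) _ (by omega)]
    ring
  · rw [dif_neg h, G_neg (by omega), add_zero]
termination_by (N + 1 - a).toNat
decreasing_by
  have := le_of_sq_le h
  omega

-- ===== VERDICT (by name: the statement is the Claim_ definition above) =====
theorem solve_spec : Claim_equal_solve := by
  intro N _
  unfold Spec_solve solve solve_alt
  rw [outerA_eq_G N 1 0 le_rfl, altOuter_eq_G N 1 0 le_rfl]
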